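-- pv_equiv track=rewrite | github.com/Suvam-paul145/SwasthaLink | backend/services/chatbot_context_service.py | _build_source_label
-- ===== SOURCE A (Python) =====
-- from typing import Any, Dict, List, Optional
--
-- def _build_source_label(
--     relevant_chunks: List[Dict[str, Any]],
--     faq_matches: List[Dict[str, str]],
-- ) -> str:
--     """Build a short source summary for UI display."""
--     labels: List[str] = []
--     if faq_matches:
--         labels.append("faq_context")
--
--     for chunk in relevant_chunks:
--         chunk_type = chunk.get("chunk_type")
--         if chunk_type and chunk_type not in labels:
--             labels.append(chunk_type)
--
--     if not labels:
--         return "none"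
--     if len(labels) <= 2:
--         return ", ".join(labels)
--     return f"{', '.join(labels[:2])} + more"
-- ===== SOURCE B (Python) =====
-- from typing import Any, Dict, List, Optional
--
-- def _build_source_label(
--     relevant_chunks: List[Dict[str, Any]],
--     faq_matches: List[Dict[str, str]],
-- ) -> str:
--     """Build a short source summary for UI display.
--
--     Early-exit scan: the label only ever shows the first two distinct
--     sources plus a '+ more' marker, so track just those two slots and a
--     third-seen flag and stop scanning as soon as a third distinct
--     source appears -- no label list is ever materialised.
--     """
--     first: Optional[str] = "faq_context" if faq_matches else None
--     second: Optional[str] = None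
--     third_seen = False
--     for chunk in relevant_chunks:
--         ct = chunk.get("chunk_type")
--         if not ct or ct == first or ct == second:
--             continue
--         if first is None:
--             first = ct
--         elif second is None:
--             second = ct
--         else:
--             third_seen = True
--             break
--     if first is None:
--         return "none"
--     if second is None:
--         return first
--     if third_seen:
--         return f"{first}, {second} + more"
--     return f"{first}, {second}"
-- ===== Notes on version B (the rewrite author's own statement) =====
-- stated objective: alternative
-- what changed: Replaces A's growing dedup list (append + membership scan, then slicing/joining the list) by an O(1)-space early-exit scan that keeps only the first two distinct labels and a third-seen flag, breaking out of the loop as soon as a third distinct source appears, and formats the result directly from the two slots.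
import Mathlib
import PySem

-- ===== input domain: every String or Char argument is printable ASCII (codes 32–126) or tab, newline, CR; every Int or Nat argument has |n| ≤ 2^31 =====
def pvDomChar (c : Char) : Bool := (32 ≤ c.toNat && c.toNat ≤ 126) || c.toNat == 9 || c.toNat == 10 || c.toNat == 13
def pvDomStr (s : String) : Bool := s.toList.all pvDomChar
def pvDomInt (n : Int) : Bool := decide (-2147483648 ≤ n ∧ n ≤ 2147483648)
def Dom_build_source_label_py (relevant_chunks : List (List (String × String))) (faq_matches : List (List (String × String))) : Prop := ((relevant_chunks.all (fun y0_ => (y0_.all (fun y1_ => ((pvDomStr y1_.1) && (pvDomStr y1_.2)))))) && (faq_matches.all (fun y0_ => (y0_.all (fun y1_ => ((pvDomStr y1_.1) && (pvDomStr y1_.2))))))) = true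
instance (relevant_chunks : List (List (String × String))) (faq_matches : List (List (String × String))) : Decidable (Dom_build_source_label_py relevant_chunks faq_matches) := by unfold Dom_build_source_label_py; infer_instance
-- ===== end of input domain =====

-- B replaces A's growing dedup list by an O(1)-space early-exit scan keeping only the
-- first two distinct labels and a third-seen flag (alternative decomposition).

-- ===== PORT A =====
-- Literal port of A: labels accumulator, append "faq_context" if faq_matches truthy,
-- then per chunk append chunk.get("chunk_type") if truthy and not already present.
def build_source_label_py (relevant_chunks : List (List (String × String))) (faq_matches : List (List (String × String))) : String :=
  let labels : List String := if faq_matches ≠ [] then ["faq_context"] else []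
  let labels := relevant_chunks.foldl (fun ls chunk =>
      match (PySem.Dict.mk chunk).get? "chunk_type" with
      | some ct => if ct ≠ "" ∧ ¬ ls.contains ct then ls ++ [ct] else ls
      | none => ls) labels
  if labels = [] then "none"
  else if labels.length ≤ 2 then PySem.Str.join ", " labels
  else PySem.Str.join ", " (labels.take 2) ++ " + more"

-- ===== PORT B =====
-- Port of Source B's for-loop with break: structural recursion over the chunks carrying the
-- two slots; the `break` is the non-recursive third arm returning (first, second, true).
def bslLoop : List (List (String × String)) → Option String → Option String → (Option String × Option String × Bool)
  | [], first, second => (first, second, false)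
  | chunk :: rest, first, second =>
    match (PySem.Dict.mk chunk).get? "chunk_type" with
    | none => bslLoop rest first second
    | some ct =>
      if ct = "" ∨ some ct = first ∨ some ct = second then bslLoop rest first second
      else match first with
        | none => bslLoop rest (some ct) second
        | some _ =>
          match second with
          | none => bslLoop rest first (some ct)
          | some _ => (first, second, true)

def build_source_label_py_alt (relevant_chunks : List (List (String × String))) (faq_matches : List (List (String × String))) : String :=
  let first : Option String := if faq_matches ≠ [] then some "faq_context" else none
  match bslLoop relevant_chunks first none with
  | (none, _, _) => "none"
  | (some f, none, _) => f
  | (some f, some s, third) => if third then f ++ ", " ++ s ++ " + more" else f ++ ", " ++ s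

-- ===== PRECONDITION & SPEC =====
def Spec_build_source_label_py (relevant_chunks : List (List (String × String))) (faq_matches : List (List (String × String))) (out : String) : Prop := out = build_source_label_py_alt relevant_chunks faq_matches
instance (relevant_chunks : List (List (String × String))) (faq_matches : List (List (String × String))) (out : String) : Decidable (Spec_build_source_label_py relevant_chunks faq_matches out) := by unfold Spec_build_source_label_py; infer_instance

-- ===== CLAIM (what is proved, stated in full; the proofs are below) =====
def Claim_equal_build_source_label_py : Prop := ∀ (relevant_chunks : List (List (String × String))) (faq_matches : List (List (String × String))), Dom_build_source_label_py relevant_chunks faq_matches → Spec_build_source_label_py relevant_chunks faq_matches (build_source_label_py relevant_chunks faq_matches)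

-- ===== LEMMAS AND PROOFS =====

-- A's per-chunk step.
def bslStep (ls : List String) (chunk : List (String × String)) : List String :=
  match (PySem.Dict.mk chunk).get? "chunk_type" with
  | some ct => if ct ≠ "" ∧ ¬ ls.contains ct then ls ++ [ct] else ls
  | none => ls

-- The state list represented by B's two slots.
def slots : Option String → Option String → List String
  | none, _ => []
  | some f, none => [f]
  | some f, some s => [f, s]

-- One step of A only appends.
theorem bslStep_append (ls : List String) (c : List (String × String)) :
    ∃ u, bslStep ls c = ls ++ u := by
  unfold bslStep
  cases h : (PySem.Dict.mk c).get? "chunk_type" with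
  | none => exact ⟨[], by simp⟩
  | some ct =>
    by_cases hc : ct ≠ "" ∧ ¬ ls.contains ct
    · exact ⟨[ct], by dsimp only; rw [if_pos hc]⟩
    · exact ⟨[], by dsimp only; rw [if_neg hc]; simp⟩

-- A's fold only appends: the start list is a prefix of the result.
theorem foldA_prefix (rc : List (List (String × String))) (ls : List String) :
    ∃ t, rc.foldl bslStep ls = ls ++ t := by
  induction rc generalizing ls with
  | nil => exact ⟨[], by simp⟩
  | cons c rest ih =>
    rw [List.foldl_cons]
    rcases bslStep_append ls c with ⟨u, hu⟩
    rcases ih (bslStep ls c) with ⟨t, ht⟩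
    exact ⟨u ++ t, by rw [ht, hu, List.append_assoc]⟩

-- Invariant: B's loop from a valid slot state computes the head-two-and-overflow view
-- of A's fold from the corresponding list.
theorem bslLoop_eq (rc : List (List (String × String))) (first second : Option String)
    (hv : second.isSome → first.isSome) :
    bslLoop rc first second =
      ((rc.foldl bslStep (slots first second))[0]?,
       (rc.foldl bslStep (slots first second))[1]?,
       decide (3 ≤ (rc.foldl bslStep (slots first second)).length)) := by
  induction rc generalizing first second with
  | nil =>
    cases first with
    | none => cases second with
      | none => simp [bslLoop, slots]
      | some s => exact absurd (hv rfl) (by simp)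
    | some f => cases second <;> simp [bslLoop, slots]
  | cons c rest ih =>
    simp only [List.foldl_cons, bslLoop]
    cases h : (PySem.Dict.mk c).get? "chunk_type" with
    | none =>
      have hst : bslStep (slots first second) c = slots first second := by simp [bslStep, h]
      dsimp only
      simp only [hst]
      exact ih first second hv
    | some ct =>
      dsimp only
      by_cases hskip : ct = "" ∨ some ct = first ∨ some ct = second
      · rw [if_pos hskip]
        have hct : ¬ (ct ≠ "" ∧ ¬ (slots first second).contains ct) := by
          rcases hskip with h1 | h1 | h1
          · intro hh; exact hh.1 h1
          · intro hh
            cases first with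
            | none => simp at h1
            | some f =>
              apply hh.2
              cases second <;> simp [slots] at h1 ⊢ <;> simp [← h1]
          · intro hh
            cases second with
            | none => simp at h1
            | some s =>
              cases first with
              | none => exact absurd (hv rfl) (by simp)
              | some f => apply hh.2; simp [slots] at h1 ⊢; right; exact h1
        have hst : bslStep (slots first second) c = slots first second := by
          unfold bslStep; rw [h]; dsimp only; rw [if_neg hct]
        simp only [hst]
        exact ih first second hv
      · rw [if_neg hskip]
        push Not at hskip
        obtain ⟨hne, hf, hs⟩ := hskip
        have hmem : ¬ (slots first second).contains ct := by
          cases first with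
          | none => simp [slots]
          | some f => cases second with
            | none => simp [slots]; intro hh; exact hf (by rw [hh])
            | some s =>
              simp [slots]
              constructor
              · intro hh; exact hf (by rw [hh])
              · intro hh; exact hs (by rw [hh])
        have hstep : bslStep (slots first second) c = slots first second ++ [ct] := by
          unfold bslStep; rw [h]; dsimp only; rw [if_pos ⟨hne, hmem⟩]
        cases first with
        | none =>
          cases second with
          | some s => exact absurd (hv rfl) (by simp)
          | none =>
            have hsl : slots (some ct) none = slots none none ++ [ct] := by simp [slots]
            simp only [hstep, ← hsl]
            exact ih (some ct) none (by simp)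
        | some f =>
          cases second with
          | none =>
            have hsl : slots (some f) (some ct) = slots (some f) none ++ [ct] := by simp [slots]
            simp only [hstep, ← hsl]
            exact ih (some f) (some ct) (by simp)
          | some s =>
            -- break: A's list is now [f, s, ct] ++ tail; head two and the ≥3 flag are fixed
            rcases foldA_prefix rest (slots (some f) (some s) ++ [ct]) with ⟨t, ht⟩
            simp only [hstep, ht]
            simp [slots]

-- joins of one- and two-element lists.
theorem join_one (a : String) : PySem.Str.join ", " [a] = a := by
  simp [PySem.Str.join, PySem.Chars.join_singleton, String.ofList_toList]

theorem join_two (a b : String) : PySem.Str.join ", " [a, b] = a ++ ", " ++ b := by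
  simp [PySem.Str.join, PySem.Chars.join_cons_cons, PySem.Chars.join_singleton]
  rw [show (','::' '::b.toList) = ", ".toList ++ b.toList from rfl, String.ofList_append,
    String.append_assoc]
  simp [String.ofList_toList]

-- ===== VERDICT (by name: the statement is the Claim_ definition above) =====
theorem build_source_label_py_spec : Claim_equal_build_source_label_py := by
  intro rc fm _
  unfold Spec_build_source_label_py build_source_label_py build_source_label_py_alt
  dsimp only
  have hstep : (fun (ls : List String) (chunk : List (String × String)) =>
      match (PySem.Dict.mk chunk).get? "chunk_type" with
      | some ct => if ct ≠ "" ∧ ¬ ls.contains ct then ls ++ [ct] else ls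
      | none => ls) = bslStep := rfl
  rw [hstep]
  by_cases hfm : fm = []
  · simp only [hfm, ne_eq, not_true_eq_false, if_false]
    rw [bslLoop_eq rc none none (by simp)]
    have hsl : slots none none = ([] : List String) := rfl
    rw [hsl]
    match hm : rc.foldl bslStep [] with
    | [] => simp
    | [a] => simp [join_one]
    | [a, b] => simp [join_two]
    | a :: b :: c :: t => simp [join_two, List.length]
  · simp only [hfm, ne_eq, not_false_iff, if_true]
    rw [bslLoop_eq rc (some "faq_context") none (by simp)]
    have hsl : slots (some "faq_context") none = ["faq_context"] := rfl
    rw [hsl]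
    match hm : rc.foldl bslStep ["faq_context"] with
    | [] => simp
    | [a] => simp [join_one]
    | [a, b] => simp [join_two]
    | a :: b :: c :: t => simp [join_two, List.length]
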